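-- pv_equiv track=rewrite | github.com/khj1998/ProblemSolving | 프로그래머스/2/150368. 이모티콘 할인행사/이모티콘 할인행사.py | solution
-- ===== SOURCE A (Python) =====
-- from itertools import product
--
-- def solution(users, emoticons):
--     answer=[]
--     discount_list = list(product([10,20,30,40],repeat = len(emoticons)))
--
--     for dis in discount_list:
--         service_user = 0
--         total_sale = 0
--
--         for user in users:
--             user_total_sale = 0
--             dis_min,sale_min = user[0],user[1]
--
--             for i in range(len(emoticons)):
--                 if dis[i] >= dis_min:
--                     user_total_sale += ((100-dis[i])*emoticons[i])//100
--
--             if user_total_sale >= sale_min: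
--                 service_user+=1
--             else:
--                 total_sale+=user_total_sale
--
--         answer.append((service_user,total_sale))
--
--     answer.sort(key = lambda x:(-x[0],-x[1]))
--
--     return answer[0]
-- ===== SOURCE B (Python) =====
-- def solution(users, emoticons):
--     # DFS over emoticons with a running lexicographic best (subscribers, then sales),
--     # instead of materializing the full product and sorting all results.
--     def score(dis):
--         service_user = 0
--         total_sale = 0
--         for user in users:
--             s = 0
--             for d, e in zip(dis, emoticons):
--                 if d >= user[0]:
--                     s += (100 - d) * e // 100
--             if s >= user[1]:
--                 service_user += 1
--             else:
--                 total_sale += s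
--         return (service_user, total_sale)
--
--     best = None
--
--     def dfs(i, dis):
--         nonlocal best
--         if i == len(emoticons):
--             cand = score(dis)
--             if best is None or cand[0] > best[0] or (cand[0] == best[0] and cand[1] > best[1]):
--                 best = cand
--             return
--         for d in (10, 20, 30, 40):
--             dis.append(d)
--             dfs(i + 1, dis)
--             dis.pop()
--
--     dfs(0, [])
--     return best
-- ===== Notes on version B (the rewrite author's own statement) =====
-- stated objective: alternative
-- what changed: A materializes the full 4^n product of discount tuples, scores each into a list, stable-sorts the list by (-subscribers,-sales) and takes the head; B does a recursive DFS over the emoticons building the discount assignment in place and folds each leaf's score into a running lexicographic best, so no product list and no sort are ever built.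
import Mathlib
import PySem

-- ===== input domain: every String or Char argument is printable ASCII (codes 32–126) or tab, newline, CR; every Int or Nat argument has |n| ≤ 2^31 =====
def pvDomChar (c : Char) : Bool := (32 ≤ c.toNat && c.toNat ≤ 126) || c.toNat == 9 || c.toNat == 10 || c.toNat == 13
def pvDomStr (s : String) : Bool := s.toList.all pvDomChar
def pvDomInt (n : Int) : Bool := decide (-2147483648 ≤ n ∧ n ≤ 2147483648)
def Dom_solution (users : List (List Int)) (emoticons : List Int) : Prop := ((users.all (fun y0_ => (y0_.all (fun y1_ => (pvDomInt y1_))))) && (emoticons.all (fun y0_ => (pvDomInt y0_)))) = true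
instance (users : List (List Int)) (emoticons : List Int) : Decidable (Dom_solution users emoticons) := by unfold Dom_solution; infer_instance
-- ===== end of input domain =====

-- B replaces A's materialize-the-whole-product-then-sort with a DFS over the emoticons
-- carrying a running lexicographic best (objective: alternative decomposition).

-- ===== PORT A =====
-- Python's stable answer.sort(key=lambda x: (-x[0],-x[1])) is the stable ascending sort under this
-- comparison (more subscribers first, then more sales); ported with core's stable List.mergeSort
-- (PySem's insertion sort is semantically identical but overflows the interpreter stack on large inputs).
def pvLe (a b : Int × Int) : Bool := decide (b.1 < a.1) || (decide (a.1 = b.1) && decide (b.2 ≤ a.2))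

-- itertools.product([10,20,30,40], repeat=n), in CPython's order (leftmost varies slowest)
def pvProdRep (xs : List Int) : Nat → List (List Int)
  | 0 => [[]]
  | n + 1 => xs.flatMap (fun x => (pvProdRep xs n).map (fun t => x :: t))

def solution (users : List (List Int)) (emoticons : List Int) : Int × Int :=
  let discount_list := pvProdRep [10, 20, 30, 40] emoticons.length
  let answer := discount_list.foldl (fun acc dis =>
    acc ++ [users.foldl (fun (st : Int × Int) user =>
      -- user[0] / user[1]: in range for every input admitted by Pre_solution
      let dis_min := PySem.List.pyGetD user 0 0
      let sale_min := PySem.List.pyGetD user 1 0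
      let user_total_sale := (PySem.List.pyRange 0 (emoticons.length : Int) 1).foldl
        (fun s i =>
          if PySem.List.pyGetD dis i 0 ≥ dis_min then
            s + PySem.Int.floordiv ((100 - PySem.List.pyGetD dis i 0) * PySem.List.pyGetD emoticons i 0) 100
          else s) 0
      if user_total_sale ≥ sale_min then (st.1 + 1, st.2) else (st.1, st.2 + user_total_sale)) ((0 : Int), (0 : Int))]) []
  PySem.List.pyGetD (answer.mergeSort pvLe) 0 (0, 0)

-- ===== PORT B =====
def pvScoreB (users : List (List Int)) (emoticons dis : List Int) : Int × Int :=
  users.foldl (fun (st : Int × Int) user =>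
    let s := (dis.zip emoticons).foldl
      (fun s de =>
        if de.1 ≥ PySem.List.pyGetD user 0 0 then
          s + PySem.Int.floordiv ((100 - de.1) * de.2) 100
        else s) 0
    if s ≥ PySem.List.pyGetD user 1 0 then (st.1 + 1, st.2) else (st.1, st.2 + s)) ((0 : Int), (0 : Int))

-- 'best = None / replace on strictly lexicographically better'
def pvBetter (b : Option (Int × Int)) (c : Int × Int) : Option (Int × Int) :=
  match b with
  | none => some c
  | some b => if c.1 > b.1 ∨ (c.1 = b.1 ∧ c.2 > b.2) then some c else some b

-- dfs(i, dis): recursion on the number of emoticons still to assign (len(emoticons) - i)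
def pvDfs (users : List (List Int)) (emoticons : List Int) :
    Nat → List Int → Option (Int × Int) → Option (Int × Int)
  | 0, dis, best => pvBetter best (pvScoreB users emoticons dis)
  | n + 1, dis, best =>
      [(10 : Int), 20, 30, 40].foldl (fun acc d => pvDfs users emoticons n (dis ++ [d]) acc) best

def solution_alt (users : List (List Int)) (emoticons : List Int) : Int × Int :=
  (pvDfs users emoticons emoticons.length [] none).getD (0, 0)

-- ===== PRECONDITION & SPEC =====
-- Pre_ excludes users with fewer than two fields, on which Python A raises IndexError (user[0]/user[1]).
def Pre_solution (users : List (List Int)) (emoticons : List Int) : Prop :=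
  ∀ u ∈ users, 2 ≤ u.length
instance (users : List (List Int)) (emoticons : List Int) : Decidable (Pre_solution users emoticons) := by unfold Pre_solution; infer_instance

def pvWitness_solution : List (List Int) × List Int := ([[40, 100], [10, 0]], [100, 50])

def Spec_solution (users : List (List Int)) (emoticons : List Int) (out : Int × Int) : Prop := out = solution_alt users emoticons
instance (users : List (List Int)) (emoticons : List Int) (out : Int × Int) : Decidable (Spec_solution users emoticons out) := by unfold Spec_solution; infer_instance

-- ===== CLAIM (what is proved, stated in full; the proofs are below) =====
def Claim_equal_solution : Prop := ∀ (users : List (List Int)) (emoticons : List Int), Dom_solution users emoticons → Pre_solution users emoticons → Spec_solution users emoticons (solution users emoticons)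

-- ===== LEMMAS AND PROOFS =====

-- the index loop over range(len(emoticons)) reading dis[i], emoticons[i] is the fold over zip(dis, emoticons)
theorem pv_range_eq_zip (f : Int → Int → Int → Int) (dis emo : List Int) (h : dis.length = emo.length) (s0 : Int) :
    (PySem.List.pyRange 0 (emo.length : Int) 1).foldl
      (fun s i => f s (PySem.List.pyGetD dis i 0) (PySem.List.pyGetD emo i 0)) s0
    = (dis.zip emo).foldl (fun s p => f s p.1 p.2) s0 := by
  have hm : (PySem.List.pyRange 0 (emo.length : Int) 1).map
      (fun i => (PySem.List.pyGetD dis i 0, PySem.List.pyGetD emo i 0)) = dis.zip emo := by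
    apply List.ext_getElem
    · simp [PySem.List.length_pyRange_one, h]
    · intro k h1 h2
      have hk : k < emo.length := by
        simpa [PySem.List.length_pyRange_one] using h1
      simp [PySem.List.getElem_pyRange_one, List.getElem_zip]
      constructor
      · simp [List.getElem?_eq_getElem (show k < dis.length by omega)]
      · simp [List.getElem?_eq_getElem hk]
  rw [← hm, List.foldl_map]

-- A's per-discount user loop computes B's score, once the discount tuple has full length
theorem pv_score_eq (users : List (List Int)) (emoticons dis : List Int) (h : dis.length = emoticons.length) :
    users.foldl (fun (st : Int × Int) user =>
      let dis_min := PySem.List.pyGetD user 0 0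
      let sale_min := PySem.List.pyGetD user 1 0
      let user_total_sale := (PySem.List.pyRange 0 (emoticons.length : Int) 1).foldl
        (fun s i =>
          if PySem.List.pyGetD dis i 0 ≥ dis_min then
            s + PySem.Int.floordiv ((100 - PySem.List.pyGetD dis i 0) * PySem.List.pyGetD emoticons i 0) 100
          else s) 0
      if user_total_sale ≥ sale_min then (st.1 + 1, st.2) else (st.1, st.2 + user_total_sale)) ((0 : Int), (0 : Int))
    = pvScoreB users emoticons dis := by
  unfold pvScoreB
  apply PySem.List.foldl_congr_mem
  intro st user _
  simp only []
  rw [pv_range_eq_zip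
    (fun s d e => if d ≥ PySem.List.pyGetD user 0 0 then s + PySem.Int.floordiv ((100 - d) * e) 100 else s)
    dis emoticons h 0]

theorem pv_len_mem_prodRep (xs : List Int) (n : Nat) (t : List Int) (ht : t ∈ pvProdRep xs n) :
    t.length = n := by
  induction n generalizing t with
  | zero => simp [pvProdRep] at ht; simp [ht]
  | succ n ih =>
    simp [pvProdRep] at ht
    obtain ⟨x, hx, t', ht', rfl⟩ := ht
    simp [ih t' ht']

-- the DFS is the fold of the running best over the mapped product
theorem pv_dfs_eq (users : List (List Int)) (emoticons : List Int) :
    ∀ (n : Nat) (dis : List Int) (best : Option (Int × Int)),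
      pvDfs users emoticons n dis best
      = ((pvProdRep [10, 20, 30, 40] n).map (fun t => pvScoreB users emoticons (dis ++ t))).foldl pvBetter best := by
  intro n
  induction n with
  | zero => intro dis best; simp [pvDfs, pvProdRep]
  | succ n ih =>
    intro dis best
    simp only [pvDfs, pvProdRep, List.flatMap_cons, List.flatMap_nil, List.append_nil,
      List.map_append, List.map_map, List.foldl_append, List.foldl_cons, List.foldl_nil]
    rw [ih, ih, ih, ih]
    simp [Function.comp_def]

theorem pvLe_trans (a b c : Int × Int) (h1 : pvLe a b = true) (h2 : pvLe b c = true) : pvLe a c = true := by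
  simp [pvLe] at *; omega

theorem pvLe_total (a b : Int × Int) : (pvLe a b || pvLe b a) = true := by
  simp [pvLe]; omega

-- replacing the running best exactly when the new score is strictly lexicographically better
theorem pvBetter_some (b x : Int × Int) :
    pvBetter (some b) x = if pvLe b x then some b else some x := by
  simp only [pvBetter, pvLe]
  split_ifs <;> simp_all <;> omega

theorem pv_foldl_better_some (l : List (Int × Int)) :
    ∀ b, l.foldl pvBetter (some b)
      = match l.foldl pvBetter none with
        | none => some b
        | some h => if pvLe b h then some b else some h := by
  induction l with
  | nil => intro b; simp
  | cons x l ih =>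
    intro b
    have hx : (x :: l).foldl pvBetter none = l.foldl pvBetter (some x) := by
      simp [pvBetter]
    simp only [List.foldl_cons, pvBetter_some, hx]
    rcases hF : l.foldl pvBetter none with _ | h
    · by_cases hbx : pvLe b x = true
      · simp [hbx, ih, hF]
      · simp [hbx, ih, hF]
    · by_cases hbx : pvLe b x = true
      · rw [if_pos hbx, ih b, hF, ih x, hF]
        by_cases hxh : pvLe x h = true
        · have hbh : pvLe b h = true := pvLe_trans _ _ _ hbx hxh
          simp [hxh, hbh, hbx]
        · simp [hxh]
      · rw [if_neg hbx, ih x, hF]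
        by_cases hxh : pvLe x h = true
        · simp [hxh, hbx]
        · have hbh : ¬ pvLe b h = true := by
            intro hbh
            have hhx : pvLe h x = true := by
              have := pvLe_total x h
              simp [hxh] at this; exact this
            exact hbx (pvLe_trans _ _ _ hbh hhx)
          simp [hxh, hbh]

-- the head of the stable sort is the running strict-better best
theorem pv_head_mergeSort (l : List (Int × Int)) :
    (l.mergeSort pvLe).head? = l.foldl pvBetter none := by
  induction l with
  | nil => simp
  | cons a l ih =>
    obtain ⟨l₁, l₂, h1, h2, h3⟩ := List.mergeSort_cons pvLe_trans pvLe_total a l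
    have hR : (a :: l).foldl pvBetter none = l.foldl pvBetter (some a) := by simp [pvBetter]
    rw [hR, pv_foldl_better_some, ← ih, h2, h1]
    cases l₁ with
    | nil =>
      simp only [List.nil_append, List.head?_cons]
      cases l₂ with
      | nil => simp
      | cons h t =>
        have hp : List.Pairwise (fun a b => pvLe a b = true) ((a :: l).mergeSort pvLe) :=
          List.pairwise_mergeSort pvLe_trans pvLe_total _
        rw [h1] at hp
        simp at hp
        have : pvLe a h = true := hp.1.1
        simp [this]
    | cons bb t =>
      have hb : pvLe a bb = false := by
        have := h3 bb (by simp)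
        simpa using this
      simp [hb]

theorem pv_pyGetD_zero {α : Type} (l : List α) (d : α) :
    PySem.List.pyGetD l 0 d = l.head?.getD d := by
  cases l <;> simp [PySem.List.pyGetD, PySem.List.pyGet?, PySem.List.pyIdx?]

-- ===== VERDICT (by name: the statement is the Claim_ definition above) =====
theorem solution_spec : Claim_equal_solution := by
  intro users emoticons _ _
  show solution users emoticons = solution_alt users emoticons
  simp only [solution, solution_alt]
  rw [PySem.List.foldl_append_singleton_eq_map, List.nil_append]
  rw [List.map_congr_left (fun t ht => pv_score_eq users emoticons t
    (pv_len_mem_prodRep [10, 20, 30, 40] emoticons.length t ht))]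
  rw [pv_dfs_eq users emoticons emoticons.length [] none]
  rw [pv_pyGetD_zero, pv_head_mergeSort]
  simp
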